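-- pv_equiv track=rewrite | github.com/VivianaLara/Proyecto-final---Derivada-de-un-producto-de-polinomios | DerivadaProductoPolinomios.py | multiplicar_polinomios
-- ===== SOURCE A (Python) =====
-- def multiplicar_polinomios(polinomio1, polinomio2):
--     """ Calcula el producto de dos polinomios.
--
--     Args:
--       polinomio1: Una lista de tuplas, donde cada tupla representa un término
--                   del polinomio en la forma (coeficiente, exponente).
--                   Ejemplo: [(2, 3), (5, 1), (-1, 0)] representa 2x^3 + 5x - 1.
--
--       polinomio2: Similar a polinomio1.
--
--     Returns:
--       List[Tuple(int, int)]: resultado_lista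
--     """
--
--     #Se crea un diccionario donde se almacenaran exponente:coeficiente
--     resultado = {}
--
--     #Se realiza la multiplicacion de los coeficientes y la suma de los exponentes de los polinomios
--     for coeficiente1, exponente1 in polinomio1:
--         for coeficiente2, exponente2 in polinomio2:
--             coeficiente_nuevo = coeficiente1 * coeficiente2
--             exponente_nuevo = exponente1 + exponente2
--
--             #Si el exponente ya se encuentra en el diccionario, se suman los coeficientes
--             if exponente_nuevo in resultado:
--                 resultado[exponente_nuevo] += coeficiente_nuevo
--
--             #Si el exponente no se encuentra en el diccionario, se agrega al diccionario en forma exponente:coeficiente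
--             else:
--                 resultado[exponente_nuevo] = coeficiente_nuevo
--
--     #Convertir el diccionario de resultados a una lista de tuplas
--     resultado_lista = [(coef, exp) for exp, coef in resultado.items()]
--
--     #Se ordena en funcion del exponente
--     resultado_lista.sort(key=lambda item: item[1], reverse=True)
--
--     return resultado_lista
-- ===== SOURCE B (Python) =====
-- def multiplicar_polinomios(polinomio1, polinomio2):
--     # Sort-then-merge instead of dict accumulation: build all product terms,
--     # sort them by exponent ascending, then one pass that prepends, coalescing
--     # equal exponents at the front; the result comes out exponent-descending.
--     terminos = [(e1 + e2, c1 * c2) for c1, e1 in polinomio1 for c2, e2 in polinomio2]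
--     terminos.sort(key=lambda t: t[0])
--     resultado = []
--     for exp, coef in terminos:
--         if resultado and resultado[0][1] == exp:
--             resultado[0] = (resultado[0][0] + coef, exp)
--         else:
--             resultado.insert(0, (coef, exp))
--     return resultado
-- ===== Notes on version B (the rewrite author's own statement) =====
-- stated objective: alternative
-- what changed: Replaces the dict-keyed accumulation (hash grouping then final sort) by building the flat product-term list, sorting it by exponent, and coalescing equal exponents in one explicit linear merge pass that prepends to the result.
import Mathlib
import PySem

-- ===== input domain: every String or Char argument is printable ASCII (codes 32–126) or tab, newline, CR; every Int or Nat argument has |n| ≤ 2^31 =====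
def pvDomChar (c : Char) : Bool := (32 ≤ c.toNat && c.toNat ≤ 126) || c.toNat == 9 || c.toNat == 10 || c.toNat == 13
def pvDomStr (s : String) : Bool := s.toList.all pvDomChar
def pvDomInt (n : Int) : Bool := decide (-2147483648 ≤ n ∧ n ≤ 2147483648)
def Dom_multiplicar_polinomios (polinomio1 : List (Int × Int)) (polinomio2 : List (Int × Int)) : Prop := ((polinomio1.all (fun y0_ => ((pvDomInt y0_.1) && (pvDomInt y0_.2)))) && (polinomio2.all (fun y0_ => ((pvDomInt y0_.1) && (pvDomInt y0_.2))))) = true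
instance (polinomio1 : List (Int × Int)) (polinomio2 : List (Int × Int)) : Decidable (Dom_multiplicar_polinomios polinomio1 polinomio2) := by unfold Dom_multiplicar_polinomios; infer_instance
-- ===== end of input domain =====

-- B replaces A's dict-keyed accumulation by sort-then-merge over the flat product-term
-- list (alternative decomposition, similar cost); both return the same list.

-- ===== PORT A =====
-- literal port of A: nested loops accumulating coefficients in a dict keyed by the
-- exponent, then items swapped to (coef, exp) and sorted by exponent descending
def multiplicar_polinomios (polinomio1 : List (Int × Int)) (polinomio2 : List (Int × Int)) : List (Int × Int) :=
  let resultado : PySem.Dict Int Int :=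
    polinomio1.foldl (fun d t1 =>
      polinomio2.foldl (fun d t2 =>
        let coeficiente_nuevo := t1.1 * t2.1
        let exponente_nuevo := t1.2 + t2.2
        if d.contains exponente_nuevo then
          d.insert exponente_nuevo (d.getD exponente_nuevo 0 + coeficiente_nuevo)
        else
          d.insert exponente_nuevo coeficiente_nuevo) d)
      PySem.Dict.empty
  let resultado_lista := resultado.items.map (fun p => (p.2, p.1))
  PySem.List.sorted resultado_lista (fun item => item.2) true

-- ===== PORT B =====
-- literal port of B: flat (exp, coef) product list, sorted by exponent ascending,
-- then one merge pass prepending to the result and coalescing equal exponents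
-- loop body of B's merge pass: coalesce into the front element or prepend
def mergeStep (resultado : List (Int × Int)) (t : Int × Int) : List (Int × Int) :=
  match resultado with
  | (c0, e0) :: tail =>
      if e0 = t.1 then (c0 + t.2, t.1) :: tail
      else (t.2, t.1) :: (c0, e0) :: tail
  | [] => [(t.2, t.1)]

def multiplicar_polinomios_alt (polinomio1 : List (Int × Int)) (polinomio2 : List (Int × Int)) : List (Int × Int) :=
  let terminos := polinomio1.flatMap (fun t1 => polinomio2.map (fun t2 => (t1.2 + t2.2, t1.1 * t2.1)))
  let ordenados := PySem.List.sorted terminos (fun t => t.1) false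
  ordenados.foldl mergeStep []

-- ===== PRECONDITION & SPEC =====
def Spec_multiplicar_polinomios (polinomio1 : List (Int × Int)) (polinomio2 : List (Int × Int)) (out : List (Int × Int)) : Prop := out = multiplicar_polinomios_alt polinomio1 polinomio2
instance (polinomio1 : List (Int × Int)) (polinomio2 : List (Int × Int)) (out : List (Int × Int)) : Decidable (Spec_multiplicar_polinomios polinomio1 polinomio2 out) := by unfold Spec_multiplicar_polinomios; infer_instance

-- ===== CLAIM (what is proved, stated in full; the proofs are below) =====
def Claim_equal_multiplicar_polinomios : Prop := ∀ (polinomio1 : List (Int × Int)) (polinomio2 : List (Int × Int)), Dom_multiplicar_polinomios polinomio1 polinomio2 → Spec_multiplicar_polinomios polinomio1 polinomio2 (multiplicar_polinomios polinomio1 polinomio2)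

-- ===== LEMMAS AND PROOFS =====

-- sum of the coefficients of the product terms with exponent e
def sumC (l : List (Int × Int)) (e : Int) : Int :=
  ((l.filter (fun t => t.1 == e)).map Prod.snd).sum

-- the list both sides compute: distinct exponents descending, with summed coefficients
def specMerge (l : List (Int × Int)) : List (Int × Int) :=
  (PySem.Set.ofList (l.map Prod.fst)).reverse.map (fun e => (sumC l e, e))

lemma sumC_append_singleton (l : List (Int × Int)) (t : Int × Int) (e : Int) :
    sumC (l ++ [t]) e = sumC l e + (if t.1 = e then t.2 else 0) := by
  simp only [sumC, List.filter_append, List.map_append, List.sum_append]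
  simp only [List.filter]
  by_cases h : t.1 = e
  · simp [h]
  · have hb : (t.1 == e) = false := by simp [h]
    simp [hb, h]

lemma sumC_of_not_mem (l : List (Int × Int)) (e : Int) (h : e ∉ l.map Prod.fst) :
    sumC l e = 0 := by
  have : l.filter (fun t => t.1 == e) = [] := by
    rw [List.filter_eq_nil_iff]
    intro t ht hbe
    exact h (List.mem_map.mpr ⟨t, ht, by simpa using hbe⟩)
  simp [sumC, this]

lemma ofList_append_singleton {α : Type} [BEq α] (xs : List α) (y : α) :
    PySem.Set.ofList (xs ++ [y]) = PySem.Set.add (PySem.Set.ofList xs) y := by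
  rw [PySem.Set.ofList_eq_foldl, PySem.Set.ofList_eq_foldl, List.foldl_append]
  rfl

lemma ofList_pairwise_le (xs : List Int) (h : xs.Pairwise (· ≤ ·)) :
    (PySem.Set.ofList xs).Pairwise (· ≤ ·) := by
  induction xs using List.reverseRecOn with
  | nil => simp [PySem.Set.ofList]
  | append_singleton xs y ih =>
      have hxs : xs.Pairwise (· ≤ ·) := (List.pairwise_append.mp h).1
      have hall : ∀ a ∈ xs, a ≤ y := by
        intro a ha
        exact (List.pairwise_append.mp h).2.2 a ha y (by simp)
      rw [ofList_append_singleton]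
      unfold PySem.Set.add
      split
      · exact ih hxs
      · rw [List.pairwise_append]
        refine ⟨ih hxs, by simp, ?_⟩
        intro a ha b hb
        rw [List.mem_singleton] at hb
        subst hb
        exact hall a ((PySem.Set.mem_ofList xs a).mp ha)

-- head of the reversed set is the element ≥ all others
lemma mergeStep_spec (Q' : List (Int × Int)) (t : Int × Int)
    (hpw : (Q' ++ [t]).Pairwise (fun a b => a.1 ≤ b.1)) :
    mergeStep (specMerge Q') t = specMerge (Q' ++ [t]) := by
  unfold mergeStep
  have hpw' : Q'.Pairwise (fun a b => a.1 ≤ b.1) := (List.pairwise_append.mp hpw).1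
  have hall : ∀ a ∈ Q', a.1 ≤ t.1 := by
    intro a ha
    exact (List.pairwise_append.mp hpw).2.2 a ha t (by simp)
  have hmapf : (Q' ++ [t]).map Prod.fst = Q'.map Prod.fst ++ [t.1] := by simp
  have hExps_pw : (PySem.Set.ofList (Q'.map Prod.fst)).Pairwise (· ≤ ·) :=
    ofList_pairwise_le _ (List.pairwise_map.mpr hpw')
  have hExps_nd : (PySem.Set.ofList (Q'.map Prod.fst)).Nodup := PySem.Set.nodup_ofList _
  have hExps_le : ∀ e ∈ PySem.Set.ofList (Q'.map Prod.fst), e ≤ t.1 := by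
    intro e he
    rcases List.mem_map.mp ((PySem.Set.mem_ofList _ _).mp he) with ⟨a, ha, rfl⟩
    exact hall a ha
  by_cases hmem : t.1 ∈ PySem.Set.ofList (Q'.map Prod.fst)
  · -- the exponent is already present: it must be the head of the reversed set
    have hadd : PySem.Set.ofList ((Q' ++ [t]).map Prod.fst) = PySem.Set.ofList (Q'.map Prod.fst) := by
      rw [hmapf, ofList_append_singleton]
      unfold PySem.Set.add
      rw [if_pos ((PySem.Set.contains_iff _ _).mpr hmem)]
    rcases hrev : (PySem.Set.ofList (Q'.map Prod.fst)).reverse with _ | ⟨e0, Etail⟩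
    · exact absurd (List.mem_reverse.mpr hmem) (by rw [hrev]; simp)
    · have hrev_pw : (e0 :: Etail).Pairwise (fun a b => b ≤ a) := by
        rw [← hrev]; exact List.pairwise_reverse.mpr hExps_pw
      have hrev_nd : (e0 :: Etail).Nodup := by
        rw [← hrev]; exact List.nodup_reverse.mpr hExps_nd
      have he0mem : e0 ∈ PySem.Set.ofList (Q'.map Prod.fst) := by
        have : e0 ∈ (PySem.Set.ofList (Q'.map Prod.fst)).reverse := by rw [hrev]; simp
        exact List.mem_reverse.mp this
      have he0 : e0 = t.1 := by
        have ht1 : t.1 ∈ e0 :: Etail := by rw [← hrev]; exact List.mem_reverse.mpr hmem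
        rcases List.mem_cons.mp ht1 with h | h
        · exact h.symm
        · have h1 : t.1 ≤ e0 := (List.pairwise_cons.mp hrev_pw).1 t.1 h
          have h2 : e0 ≤ t.1 := hExps_le e0 he0mem
          omega
      have hEtail_ne : ∀ e ∈ Etail, e ≠ t.1 := by
        intro e he hcontra
        have : e0 ∉ Etail := (List.nodup_cons.mp hrev_nd).1
        exact this (by rw [he0, ← hcontra] at *; exact he)
      simp only [specMerge, hadd, hrev, List.map_cons]
      rw [if_pos he0]
      congr 1
      · rw [sumC_append_singleton, if_pos he0.symm, he0]
      · apply List.map_congr_left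
        intro e he
        rw [sumC_append_singleton, if_neg (fun hh => hEtail_ne e he hh.symm), add_zero]
  · -- new exponent: it is prepended
    have hnotQ : t.1 ∉ Q'.map Prod.fst := fun hh => hmem ((PySem.Set.mem_ofList _ _).mpr hh)
    have hadd : PySem.Set.ofList ((Q' ++ [t]).map Prod.fst)
        = PySem.Set.ofList (Q'.map Prod.fst) ++ [t.1] := by
      rw [hmapf, ofList_append_singleton]
      unfold PySem.Set.add
      rw [if_neg]
      intro hc
      exact hmem ((PySem.Set.contains_iff _ _).mp hc)
    have hrhs : specMerge (Q' ++ [t]) = (t.2, t.1) :: specMerge Q' := by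
      simp only [specMerge, hadd, List.reverse_append, List.reverse_cons, List.reverse_nil,
        List.nil_append, List.cons_append, List.map_cons]
      congr 1
      · rw [sumC_append_singleton, if_pos rfl, sumC_of_not_mem Q' t.1 hnotQ, zero_add]
      · apply List.map_congr_left
        intro e he
        have heQ : e ∈ Q'.map Prod.fst :=
          (PySem.Set.mem_ofList _ _).mp (List.mem_reverse.mp he)
        have : e ≠ t.1 := fun hh => hnotQ (hh ▸ heQ)
        rw [sumC_append_singleton, if_neg (fun hh => this hh.symm), add_zero]
    rw [hrhs]
    rcases hsp : specMerge Q' with _ | ⟨⟨c0, e0⟩, tl⟩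
    · rfl
    · have he0 : e0 ∈ (PySem.Set.ofList (Q'.map Prod.fst)).reverse := by
        have : (c0, e0) ∈ specMerge Q' := by rw [hsp]; simp
        rcases List.mem_map.mp this with ⟨e, he, heq⟩
        have : e = e0 := congrArg Prod.snd heq
        exact this ▸ he
      have hne : e0 ≠ t.1 := by
        intro hh
        exact hnotQ ((PySem.Set.mem_ofList _ _).mp (List.mem_reverse.mp (hh ▸ he0)) )
      simp only []
      rw [if_neg hne]

-- B's merge fold over an exponent-ascending list computes specMerge
lemma foldl_merge_eq_spec (Q : List (Int × Int)) (h : Q.Pairwise (fun a b => a.1 ≤ b.1)) :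
    Q.foldl mergeStep [] = specMerge Q := by
  induction Q using List.reverseRecOn with
  | nil => simp [specMerge, PySem.Set.ofList]
  | append_singleton Q' t ih =>
      rw [List.foldl_append, List.foldl_cons, List.foldl_nil,
        ih (List.pairwise_append.mp h).1]
      exact mergeStep_spec Q' t h

-- A's dict getD is the coefficient sum
lemma getD_foldl_step (l : List (Int × Int)) (d : PySem.Dict Int Int) (e : Int) :
    (l.foldl (fun d t => d.insert t.1 (d.getD t.1 0 + t.2)) d).getD e 0
      = d.getD e 0 + sumC l e := by
  induction l generalizing d with
  | nil => simp [sumC]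
  | cons t l ih =>
      rw [List.foldl_cons, ih]
      rw [PySem.Dict.getD_insert]
      by_cases h : e = t.1
      · subst h; simp [sumC, add_assoc, add_comm, add_left_comm]
      · have h' : ¬ (t.1 = e) := fun hh => h hh.symm
        simp [sumC, h, h']

-- A's loop body as a function (proof helper)
def gstep (d : PySem.Dict Int Int) (t : Int × Int) : PySem.Dict Int Int :=
  if d.contains t.1 then d.insert t.1 (d.getD t.1 0 + t.2) else d.insert t.1 t.2

lemma gstep_eq (d : PySem.Dict Int Int) (t : Int × Int) :
    gstep d t = d.insert t.1 (d.getD t.1 0 + t.2) := by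
  unfold gstep
  split
  · rfl
  · rename_i h
    rw [PySem.Dict.getD_of_not_contains d 0 (by simpa using h), zero_add]

lemma nested_foldl (p1 p2 : List (Int × Int)) (d : PySem.Dict Int Int) :
    p1.foldl (fun d t1 => p2.foldl (fun d t2 => gstep d (t1.2 + t2.2, t1.1 * t2.1)) d) d
      = (p1.flatMap (fun t1 => p2.map (fun t2 => (t1.2 + t2.2, t1.1 * t2.1)))).foldl gstep d := by
  rw [List.foldl_flatMap]
  simp only [List.foldl_map]

-- ===== VERDICT (by name: the statement is the Claim_ definition above) =====
theorem multiplicar_polinomios_spec : Claim_equal_multiplicar_polinomios := by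
  intro p1 p2 _
  unfold Spec_multiplicar_polinomios multiplicar_polinomios multiplicar_polinomios_alt
  dsimp only
  set P := p1.flatMap (fun t1 => p2.map (fun t2 => (t1.2 + t2.2, t1.1 * t2.1))) with hP
  set Q := PySem.List.sorted P (fun t => t.1) false with hQ
  have hQpw : Q.Pairwise (fun a b => a.1 ≤ b.1) := PySem.List.sorted_pairwise P (fun t => t.1)
  have hQP : Q.Perm P := PySem.List.sorted_perm P (fun t => t.1) false
  -- the right-hand side is specMerge Q
  rw [foldl_merge_eq_spec Q hQpw]
  -- the dict loop is a single fold of gstep over P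
  have hnest : p1.foldl (fun d t1 =>
      p2.foldl (fun d t2 =>
        let coeficiente_nuevo := t1.1 * t2.1
        let exponente_nuevo := t1.2 + t2.2
        if d.contains exponente_nuevo then
          d.insert exponente_nuevo (d.getD exponente_nuevo 0 + coeficiente_nuevo)
        else
          d.insert exponente_nuevo coeficiente_nuevo) d)
      PySem.Dict.empty
      = P.foldl (fun d t => d.insert t.1 (d.getD t.1 0 + t.2)) PySem.Dict.empty := by
    rw [show (fun (d : PySem.Dict Int Int) (t1 : Int × Int) =>
        p2.foldl (fun d t2 =>
          let coeficiente_nuevo := t1.1 * t2.1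
          let exponente_nuevo := t1.2 + t2.2
          if d.contains exponente_nuevo then
            d.insert exponente_nuevo (d.getD exponente_nuevo 0 + coeficiente_nuevo)
          else
            d.insert exponente_nuevo coeficiente_nuevo) d)
        = (fun d t1 => p2.foldl (fun d t2 => gstep d (t1.2 + t2.2, t1.1 * t2.1)) d) from rfl]
    rw [nested_foldl p1 p2 PySem.Dict.empty, ← hP]
    congr 1
    funext d t
    exact gstep_eq d t
  rw [hnest]
  set D := P.foldl (fun d t => d.insert t.1 (d.getD t.1 0 + t.2)) PySem.Dict.empty with hD
  have hkeys : D.keys = PySem.Set.ofList (P.map Prod.fst) := by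
    rw [hD, PySem.Dict.keys_foldl_insert_key P Prod.fst (fun d t => d.getD t.1 0 + t.2)
      PySem.Dict.empty, PySem.Dict.keys_empty, PySem.Set.update_nil_left]
  have hnd : D.keys.Nodup := by
    rw [hkeys]; exact PySem.Set.nodup_ofList _
  have hgetD : ∀ e, D.getD e 0 = sumC P e := by
    intro e
    rw [hD, getD_foldl_step, PySem.Dict.getD_empty, zero_add]
  have hitems : D.items.map (fun p => (p.2, p.1))
      = (PySem.Set.ofList (P.map Prod.fst)).map (fun e => (sumC P e, e)) := by
    rw [PySem.Dict.items_eq_map_keys D hnd 0, hkeys, List.map_map]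
    apply List.map_congr_left
    intro e _
    simp [hgetD e]
  rw [hitems]
  -- name the sorted result: specMerge Q is the strictly-descending rearrangement
  apply PySem.List.sorted_rev_eq_of_perm_of_pairwise_gt
  · -- permutation
    have hsum : ∀ e, sumC Q e = sumC P e := by
      intro e
      exact ((hQP.filter _).map Prod.snd).sum_eq
    have hfun : (fun e => (sumC Q e, e)) = (fun e => (sumC P e, e)) := by
      funext e; rw [hsum]
    have hmemiff : ∀ e, e ∈ (PySem.Set.ofList (Q.map Prod.fst)).reverse
        ↔ e ∈ PySem.Set.ofList (P.map Prod.fst) := by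
      intro e
      rw [List.mem_reverse, PySem.Set.mem_ofList, PySem.Set.mem_ofList,
        (hQP.map Prod.fst).mem_iff]
    have hpermE : (PySem.Set.ofList (Q.map Prod.fst)).reverse.Perm
        (PySem.Set.ofList (P.map Prod.fst)) :=
      (List.perm_ext_iff_of_nodup (List.nodup_reverse.mpr (PySem.Set.nodup_ofList _))
        (PySem.Set.nodup_ofList _)).mpr hmemiff
    unfold specMerge
    rw [hfun]
    exact hpermE.map _
  · -- strict descent of the exponents
    have hEpw : (PySem.Set.ofList (Q.map Prod.fst)).Pairwise (· ≤ ·) :=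
      ofList_pairwise_le _ (List.pairwise_map.mpr hQpw)
    have hEnd : (PySem.Set.ofList (Q.map Prod.fst)).Pairwise (· ≠ ·) :=
      PySem.Set.nodup_ofList _
    have hlt : (PySem.Set.ofList (Q.map Prod.fst)).Pairwise (· < ·) :=
      (hEpw.and hEnd).imp (fun h => lt_of_le_of_ne h.1 h.2)
    have hrev : (PySem.Set.ofList (Q.map Prod.fst)).reverse.Pairwise (fun a b => b < a) :=
      List.pairwise_reverse.mpr hlt
    unfold specMerge
    exact List.pairwise_map.mpr (hrev.imp (fun h => h))
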